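-- pv_equiv track=rewrite | github.com/LyraXv/Moca4Cup | features/classification_features.py | get_modified_chunks
-- ===== SOURCE A (Python) =====
-- def get_modified_chunks(code_change_seq):
--     continous = False
--     cnt = 0
--     for token in code_change_seq:
--         if token[2] != "equal" and continous==False:
--             continous = True
--             cnt +=1
--         elif token[2] == "equal":
--             continous = False
--     return cnt
-- ===== SOURCE B (Python) =====
-- def get_modified_chunks(code_change_seq):
--     seq = list(code_change_seq)
--     n = len(seq)
--     i = 0
--     cnt = 0
--     while i < n:
--         is_equal = seq[i][2] == "equal"
--         if not is_equal:
--             cnt += 1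
--         j = i + 1
--         while j < n and (seq[j][2] == "equal") == is_equal:
--             j += 1
--         i = j
--     return cnt
-- ===== Notes on version B (the rewrite author's own statement) =====
-- stated objective: alternative
-- what changed: Replaces A's rising-edge boolean flag with a run-partition scan: B jumps run by run (skipping each maximal same-key run) and counts the runs whose tokens are not 'equal'.
import Mathlib
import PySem

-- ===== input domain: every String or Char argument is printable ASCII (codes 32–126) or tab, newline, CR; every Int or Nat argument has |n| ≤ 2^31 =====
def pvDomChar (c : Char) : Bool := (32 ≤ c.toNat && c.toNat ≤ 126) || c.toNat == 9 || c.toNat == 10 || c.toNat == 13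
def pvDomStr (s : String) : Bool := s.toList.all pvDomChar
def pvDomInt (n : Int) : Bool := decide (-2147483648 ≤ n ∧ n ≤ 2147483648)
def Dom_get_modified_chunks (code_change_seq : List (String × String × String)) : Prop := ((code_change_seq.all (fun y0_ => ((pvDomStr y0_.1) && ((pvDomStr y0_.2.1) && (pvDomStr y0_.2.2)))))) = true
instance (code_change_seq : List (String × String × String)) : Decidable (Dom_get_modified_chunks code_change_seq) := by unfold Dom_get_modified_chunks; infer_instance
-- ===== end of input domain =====

-- ===== PORT A =====
-- A: one pass with a 'continous' flag; counts rising edges of non-equal tokens.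
def get_modified_chunks (code_change_seq : List (String × String × String)) : Int :=
  (code_change_seq.foldl
    (fun (s : Bool × Int) token =>
      if token.2.2 ≠ "equal" ∧ s.1 = false then (true, s.2 + 1)
      else if token.2.2 = "equal" then (false, s.2)
      else s)
    (false, 0)).2

-- ===== PORT B =====
-- B: run-partition scan — skip each maximal same-key run; count the non-"equal" runs.
def get_modified_chunks_alt : List (String × String × String) → Int
  | [] => 0
  | t :: rest =>
    if t.2.2 == "equal" then
      get_modified_chunks_alt (rest.dropWhile (fun u => u.2.2 == "equal"))
    else
      1 + get_modified_chunks_alt (rest.dropWhile (fun u => u.2.2 != "equal"))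
termination_by l => l.length
decreasing_by
  all_goals
    simp only [List.length_cons]
    exact Nat.lt_succ_of_le (List.length_dropWhile_le _ _)

-- ===== PRECONDITION & SPEC =====
def Spec_get_modified_chunks (code_change_seq : List (String × String × String)) (out : Int) : Prop := out = get_modified_chunks_alt code_change_seq
instance (code_change_seq : List (String × String × String)) (out : Int) : Decidable (Spec_get_modified_chunks code_change_seq out) := by unfold Spec_get_modified_chunks; infer_instance

-- ===== CLAIM (what is proved, stated in full; the proofs are below) =====
def Claim_equal_get_modified_chunks : Prop := ∀ (code_change_seq : List (String × String × String)), Dom_get_modified_chunks code_change_seq → Spec_get_modified_chunks code_change_seq (get_modified_chunks code_change_seq)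

-- ===== LEMMAS AND PROOFS =====

-- ===== VERDICT (by name: the statement is the Claim_ definition above) =====
-- skipping a leading "equal" run does not change B's count
theorem alt_dropWhile_equal (l : List (String × String × String)) :
    get_modified_chunks_alt (l.dropWhile (fun u => u.2.2 == "equal")) =
      get_modified_chunks_alt l := by
  cases l with
  | nil => rfl
  | cons t rest =>
    by_cases h : t.2.2 = "equal"
    · have hb : (t.2.2 == "equal") = true := by simp [h]
      simp [List.dropWhile, hb, get_modified_chunks_alt]
    · have hb : (t.2.2 == "equal") = false := by simp [h]
      simp [List.dropWhile, hb]

theorem fold_invariant (l : List (String × String × String)) (c : Bool) (cnt : Int) :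
    (l.foldl
      (fun (s : Bool × Int) token =>
        if token.2.2 ≠ "equal" ∧ s.1 = false then (true, s.2 + 1)
        else if token.2.2 = "equal" then (false, s.2)
        else s)
      (c, cnt)).2 =
    cnt + (if c then
            get_modified_chunks_alt (l.dropWhile (fun u => u.2.2 != "equal"))
          else get_modified_chunks_alt l) := by
  induction l generalizing c cnt with
  | nil => cases c <;> simp [get_modified_chunks_alt]
  | cons t rest ih =>
    by_cases h : t.2.2 = "equal"
    · cases c <;>
        simp [List.foldl_cons, h, ih, List.dropWhile, get_modified_chunks_alt,
          alt_dropWhile_equal]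
    · have hn : (t.2.2 != "equal") = true := by simp [h]
      cases c
      · simp only [List.foldl_cons, h, not_false_iff, true_and, if_pos rfl, ih,
          if_pos, get_modified_chunks_alt, hn]
        simp [h, hn]
        ring
      · simp [List.foldl_cons, h, ih, List.dropWhile, hn]

theorem get_modified_chunks_spec : Claim_equal_get_modified_chunks := by
  intro l _
  unfold Spec_get_modified_chunks get_modified_chunks
  rw [fold_invariant]
  simp
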